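-- pv_equiv track=rewrite | github.com/jbylund/arcane_tutor | api/parsing.py | preprocess_implicit_and
-- ===== SOURCE A (Python) =====
-- def preprocess_implicit_and(query: str) -> str:
--     """Pre-process query to convert implicit AND operations to explicit ones"""
--     import re
--
--     # Split the query into tokens while preserving quoted strings and operators
--     tokens = []
--     i = 0
--     while i < len(query):
--         char = query[i]
--
--         if char == '"':
--             # Handle quoted string
--             end_quote = query.find('"', i + 1)
--             if end_quote == -1:
--                 raise ValueError("Unmatched quote in query")
--             tokens.append(query[i:end_quote + 1])
--             i = end_quote + 1
--         elif char in '()':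
--             # Handle parentheses
--             tokens.append(char)
--             i += 1
--         elif char.isspace():
--             # Skip whitespace
--             i += 1
--         elif char in '><=!':
--             # Handle operators
--             if i + 1 < len(query) and query[i:i+2] in ['>=', '<=', '!=']:
--                 tokens.append(query[i:i+2])
--                 i += 2
--             else:
--                 tokens.append(char)
--                 i += 1
--         elif char == '-':
--             # Handle negation as a separate token
--             tokens.append(char)
--             i += 1
--         elif char == ':':
--             # Handle colon operator
--             tokens.append(char)
--             i += 1
--         else:
--             # Handle words
--             word_end = i
--             while word_end < len(query) and (query[word_end].isalnum() or query[word_end] == '_'):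
--                 word_end += 1
--             tokens.append(query[i:word_end])
--             i = word_end
--
--     # Convert implicit AND operations
--     result = []
--     i = 0
--     while i < len(tokens):
--         token = tokens[i]
--         result.append(token)
--
--         # Check if we need to insert an implicit AND
--         if i + 1 < len(tokens):
--             next_token = tokens[i + 1]
--
--             # Insert AND if:
--             # 1. Current token is not an operator
--             # 2. Next token is not an operator (but allow negation)
--             # 3. Current token is not a left parenthesis
--             # 4. Next token is not a right parenthesis
--             # 5. Current token is not AND/OR
--             # 6. Next token is not AND/OR
--             if (not is_operator(token) and
--                 not is_operator(next_token) and
--                 token != '(' and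
--                 next_token != ')' and
--                 token.upper() not in ['AND', 'OR'] and
--                 next_token.upper() not in ['AND', 'OR']):
--                 result.append('AND')
--             # Special case: if current token is not an operator and next token is negation,
--             # we need to insert AND to separate them as factors
--             elif (not is_operator(token) and
--                   next_token == '-' and
--                   token != '(' and
--                   token.upper() not in ['AND', 'OR']):
--                 result.append('AND')
--
--         i += 1
--
--     return ' '.join(result)
--
-- def is_operator(token: str) -> bool:
--     """Check if a token is an operator"""
--     return token in [':', '>', '<', '>=', '<=', '=', '!=', '-']
-- ===== SOURCE B (Python) =====
-- import re
--
-- _TOKEN_RE = re.compile(r'"[^"]*"|>=|<=|!=|[><=!:()-]|[A-Za-z0-9_]+')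
--
-- _OPERATORS = frozenset([':', '>', '<', '>=', '<=', '=', '!=', '-'])
--
--
-- def _needs_and(cur: str, nxt: str) -> bool:
--     if cur in _OPERATORS or cur == '(' or cur.upper() in ('AND', 'OR'):
--         return False
--     if nxt == '-':
--         return True
--     return nxt not in _OPERATORS and nxt != ')' and nxt.upper() not in ('AND', 'OR')
--
--
-- def preprocess_implicit_and(query: str) -> str:
--     """Pre-process query to convert implicit AND operations to explicit ones"""
--     if query.count('"') % 2:
--         raise ValueError("Unmatched quote in query")
--     tokens = _TOKEN_RE.findall(query)
--     out = []
--     for cur, nxt in zip(tokens, tokens[1:]):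
--         out.append(cur)
--         if _needs_and(cur, nxt):
--             out.append('AND')
--     out += tokens[-1:]
--     return ' '.join(out)
-- ===== Notes on version B (the rewrite author's own statement) =====
-- stated objective: idiomatic
-- what changed: Replaces A's hand-rolled pointer-advancing character scanner with a single compiled-regex tokenization (ordered alternation, re.findall) plus an odd-quote-count check, and replaces A's index-based insertion loop with one pass over adjacent token pairs (zip) using a named needs-AND predicate.
import Mathlib
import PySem

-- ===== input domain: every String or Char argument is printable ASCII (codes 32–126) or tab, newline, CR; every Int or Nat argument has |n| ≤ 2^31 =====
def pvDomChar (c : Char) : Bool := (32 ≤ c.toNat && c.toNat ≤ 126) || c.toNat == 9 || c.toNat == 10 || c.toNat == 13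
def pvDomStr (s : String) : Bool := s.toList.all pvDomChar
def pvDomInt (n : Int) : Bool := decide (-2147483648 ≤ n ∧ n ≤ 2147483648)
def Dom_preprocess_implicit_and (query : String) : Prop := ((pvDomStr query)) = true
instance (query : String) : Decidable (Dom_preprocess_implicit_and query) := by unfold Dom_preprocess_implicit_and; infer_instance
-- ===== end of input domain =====

-- B tokenizes with one regex-style alternation scan (structural recursion, ordered alternatives)
-- and inserts the implicit ANDs in one pass over adjacent token pairs, instead of A's
-- index-pointer scanner and index loop; same return value on Pre_.

-- word characters: on the ASCII domain Python's `isalnum() or '_'` (A) and the regex class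
-- `[A-Za-z0-9_]` (B) denote the same characters, so both ports use this one predicate.
def pvWordChar (c : Char) : Bool := PySem.Chars.isalnum c || c == '_'

-- ===== PORT A =====
-- is_operator(token)
def pvIsOpA (t : List Char) : Bool :=
  [[':'], ['>'], ['<'], ['>','='], ['<','='], ['='], ['!','='], ['-']].contains t

-- while word_end < len(query) and (query[word_end].isalnum() or query[word_end] == '_'): word_end += 1
def pvWordEnd (cs : List Char) (i : Nat) : Nat :=
  i + ((cs.drop i).takeWhile pvWordChar).length

-- A's tokenizer while-loop; the fuel only makes the loop total (A loops forever on an unhandled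
-- character — then, and on the unmatched-quote ValueError, the result is `none`, outside Pre_).
def pvTokA (cs : List Char) : Nat → Nat → Option (List (List Char))
  | 0, _ => none
  | fuel+1, i =>
    match cs[i]? with
    | none => some []
    | some c =>
      if c = '"' then
        let e := PySem.Chars.findFrom cs ['"'] ((i : Int) + 1)
        if e = -1 then none
        else (pvTokA cs fuel (e.toNat + 1)).map
          (fun ts => PySem.List.slice cs (some (i : Int)) (some (e + 1)) :: ts)
      else if c = '(' || c = ')' then (pvTokA cs fuel (i+1)).map ([c] :: ·)
      else if PySem.Chars.isspace c then pvTokA cs fuel (i+1)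
      else if c = '>' || c = '<' || c = '=' || c = '!' then
        if i + 1 < cs.length ∧
            ([['>','='], ['<','='], ['!','=']].contains
              (PySem.List.slice cs (some (i : Int)) (some ((i : Int) + 2))) = true) then
          (pvTokA cs fuel (i+2)).map
            (PySem.List.slice cs (some (i : Int)) (some ((i : Int) + 2)) :: ·)
        else (pvTokA cs fuel (i+1)).map ([c] :: ·)
      else if c = '-' then (pvTokA cs fuel (i+1)).map ([c] :: ·)
      else if c = ':' then (pvTokA cs fuel (i+1)).map ([c] :: ·)
      else
        let we := pvWordEnd cs i
        (pvTokA cs fuel we).map (PySem.List.slice cs (some (i : Int)) (some (we : Int)) :: ·)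

def pvAndOr : List (List Char) := [['A','N','D'], ['O','R']]

-- condition of A's `if` (insert AND between two non-operator factors)
def pvCond1 (t nxt : List Char) : Bool :=
  !pvIsOpA t && !pvIsOpA nxt && t != ['('] && nxt != [')'] &&
    !pvAndOr.contains (PySem.Chars.upper t) && !pvAndOr.contains (PySem.Chars.upper nxt)

-- condition of A's `elif` (next token is a negation)
def pvCond2 (t nxt : List Char) : Bool :=
  !pvIsOpA t && nxt == ['-'] && t != ['('] && !pvAndOr.contains (PySem.Chars.upper t)

-- A's result-building while-loop over tokens (appends 'AND' when a lookahead token exists)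
def pvAndA : List (List Char) → List (List Char)
  | [] => []
  | [t] => [t]
  | t :: nxt :: rest =>
    t :: (if pvCond1 t nxt then [['A','N','D']]
          else if pvCond2 t nxt then [['A','N','D']] else []) ++ pvAndA (nxt :: rest)

def preprocess_implicit_and (query : String) : String :=
  match pvTokA query.toList (query.toList.length + 1) 0 with
  | none => ""   -- ValueError / A never returns: outside Pre_
  | some toks => String.ofList (PySem.Chars.join [' '] (pvAndA toks))

-- ===== PORT B =====
def pvIsOpB (t : List Char) : Bool :=
  [[':'], ['>'], ['<'], ['>','='], ['<','='], ['='], ['!','='], ['-']].contains t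

-- _needs_and(cur, nxt)
def pvNeedsB (cur nxt : List Char) : Bool :=
  if pvIsOpB cur || cur == ['('] || pvAndOr.contains (PySem.Chars.upper cur) then false
  else if nxt == ['-'] then true
  else !pvIsOpB nxt && nxt != [')'] && !pvAndOr.contains (PySem.Chars.upper nxt)

-- _TOKEN_RE.findall: leftmost-match scan with ordered alternation
--   "[^"]*"  |  >=|<=|!=  |  [><=!:()-]  |  [A-Za-z0-9_]+   (unmatched characters are skipped)
def pvTokB : List Char → List (List Char)
  | [] => []
  | c :: rest =>
    if c = '"' then
      if (rest.takeWhile (· ≠ '"')).length < rest.length then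
        ('"' :: rest.takeWhile (· ≠ '"') ++ ['"']) ::
          pvTokB (rest.drop ((rest.takeWhile (· ≠ '"')).length + 1))
      else pvTokB rest        -- no closing quote: the quoted alternative cannot match here
    else if (c = '>' || c = '<' || c = '!') && rest.head? = some '=' then
      [c, '='] :: pvTokB rest.tail
    else if [['>'], ['<'], ['='], ['!'], [':'], ['('], [')'], ['-']].contains [c] then
      [c] :: pvTokB rest
    else if pvWordChar c then
      (c :: rest.takeWhile pvWordChar) :: pvTokB (rest.drop (rest.takeWhile pvWordChar).length)
    else pvTokB rest
  termination_by cs => cs.length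
  decreasing_by all_goals (simp [List.length_drop]; try omega)

def preprocess_implicit_and_alt (query : String) : String :=
  if query.toList.count '"' % 2 = 1 then ""   -- B raises ValueError here: outside Pre_
  else
    String.ofList (PySem.Chars.join [' ']
      (((pvTokB query.toList).zip ((pvTokB query.toList).drop 1)).flatMap
          (fun p => p.1 :: (if pvNeedsB p.1 p.2 then [['A','N','D']] else []))
        ++ PySem.List.slice (pvTokB query.toList) (some (-1)) none))   -- tokens[-1:]

-- ===== PRECONDITION & SPEC =====
-- characters A can tokenize (outside quoted spans)
def pvAllowed (c : Char) : Bool :=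
  pvWordChar c || PySem.Chars.isspace c ||
    ['(', ')', '>', '<', '=', '!', '-', ':'].contains c

-- Pre_ excludes exactly the inputs on which A never returns normally: strings with an opening
-- quote that has no closing quote (ValueError) and strings with a character outside A's handled
-- classes in an unquoted position (A's word branch then loops forever appending '').
-- Shape condition: scan the string once, tracking only whether we are inside a quoted span, and
-- require every unquoted character to be in A's handled classes and every quote to be closed.
def pvGood : Bool → List Char → Bool
  | false, [] => true
  | true,  [] => false
  | true,  c :: rest => if c = '"' then pvGood false rest else pvGood true rest
  | false, c :: rest => if c = '"' then pvGood true rest else pvAllowed c && pvGood false rest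

def Pre_preprocess_implicit_and (query : String) : Prop := pvGood false query.toList = true
instance (query : String) : Decidable (Pre_preprocess_implicit_and query) := by
  unfold Pre_preprocess_implicit_and; infer_instance

def pvWitness_preprocess_implicit_and : String := "name:\"a b\" -tag (x>=2 or y)"

def Spec_preprocess_implicit_and (query : String) (out : String) : Prop := out = preprocess_implicit_and_alt query
instance (query : String) (out : String) : Decidable (Spec_preprocess_implicit_and query out) := by unfold Spec_preprocess_implicit_and; infer_instance

-- ===== CLAIM (what is proved, stated in full; the proofs are below) =====
def Claim_equal_preprocess_implicit_and : Prop := ∀ (query : String), Dom_preprocess_implicit_and query → Pre_preprocess_implicit_and query → Spec_preprocess_implicit_and query (preprocess_implicit_and query)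

-- ===== LEMMAS AND PROOFS =====

-- whitespace is not a word character
lemma pv_space_not_word (c : Char) (h : PySem.Chars.isspace c = true) : pvWordChar c = false := by
  by_cases hu : c = '_'
  · subst hu; exact absurd h (by decide)
  · simp [PySem.Chars.isspace] at h
    simp [pvWordChar, PySem.Chars.isalnum, PySem.Chars.isalpha, PySem.Chars.isdigit,
      PySem.Chars.isupper, PySem.Chars.islower, hu, Char.le_def, UInt32.le_iff_toNat_le]
    omega

-- the two AND-insertion conditions agree
lemma pv_needs_aux (ot on tp np au an dm : Bool) :
    (if (!ot && !on && !tp && !np && !au && !an) = true then [['A','N','D']]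
     else if (!ot && dm && !tp && !au) = true then [['A','N','D']] else ([] : List (List Char)))
      = (if (if (ot || tp || au) = true then false
             else if dm = true then true
             else !on && !np && !an) = true then [['A','N','D']] else []) := by
  cases ot <;> cases on <;> cases tp <;> cases np <;> cases au <;> cases an <;> cases dm <;> rfl

lemma pv_needs_eq (t nxt : List Char) :
    (if pvCond1 t nxt then [['A','N','D']]
     else if pvCond2 t nxt then [['A','N','D']] else ([] : List (List Char)))
      = (if pvNeedsB t nxt then [['A','N','D']] else []) := by
  simp only [pvNeedsB, pvCond1, pvCond2, pvIsOpA, pvIsOpB, bne]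
  exact pv_needs_aux _ _ _ _ _ _ _

-- A's token loop = B's adjacent-pair pass
lemma pv_and_eq (toks : List (List Char)) :
    pvAndA toks =
      (toks.zip (toks.drop 1)).flatMap
        (fun p => p.1 :: (if pvNeedsB p.1 p.2 then [['A','N','D']] else []))
      ++ PySem.List.slice toks (some (-1)) none := by
  induction toks using pvAndA.induct with
  | case1 => simp [pvAndA, PySem.List.slice_from_neg_one]
  | case2 t => simp [pvAndA, PySem.List.slice_from_neg_one]
  | case3 t nxt rest ih =>
    simp only [pvAndA, List.drop_succ_cons, List.drop_zero, List.zip_cons_cons,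
      List.flatMap_cons] at *
    rw [PySem.List.slice_from_neg_one] at *
    simp only [List.length_cons] at *
    have hdrop : (t :: nxt :: rest).drop (rest.length + 1 + 1 - 1)
        = (nxt :: rest).drop (rest.length + 1 - 1) := by simp
    rw [hdrop, pv_needs_eq, ih]
    simp

-- a singleton-pattern `find` on a string whose first quote follows `pre`
lemma pv_find_quote (pre tl : List Char) (hp : '"' ∉ pre) :
    PySem.Chars.find (pre ++ '"' :: tl) ['"'] = (pre.length : Int) := by
  have hmem : '"' ∈ pre ++ '"' :: tl := by simp
  have hinf : ['"'] <:+: pre ++ '"' :: tl := ⟨pre, tl, by simp⟩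
  have hne : PySem.Chars.find (pre ++ '"' :: tl) ['"'] ≠ -1 := by
    intro hEq
    rw [PySem.Chars.find_eq_neg_one_iff] at hEq
    exact hEq hinf
  have hspec := PySem.Chars.findFrom_natCast_spec (pre ++ '"' :: tl) ['"'] 0 (by simp)
    (by simp only [Nat.cast_zero, PySem.Chars.findFrom_zero]; exact hne)
  simp only [Nat.cast_zero, PySem.Chars.findFrom_zero] at hspec
  obtain ⟨h0, hpref, hmin⟩ := hspec
  push_cast at h0
  set f := PySem.Chars.find (pre ++ '"' :: tl) ['"'] with hf
  have hle : f.toNat ≤ pre.length := by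
    by_contra hgt
    exact hmin pre.length (Nat.zero_le _) (by omega) ⟨tl, by simp [List.drop_left]⟩
  have hge : ¬ f.toNat < pre.length := by
    intro hlt
    obtain ⟨t2, ht2⟩ := hpref
    have hhead : (pre ++ '"' :: tl)[f.toNat]? = some '"' := by
      rw [← List.head?_drop, ← ht2]; rfl
    rw [List.getElem?_append_left (by omega)] at hhead
    have : pre[f.toNat]? = some '"' := hhead
    exact hp (List.mem_of_getElem? this)
  omega

-- pvGood facts
lemma pvGood_true_of_no_quote (l : List Char) (h : '"' ∉ l) : pvGood true l = false := by
  induction l with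
  | nil => rfl
  | cons c r ih =>
    have hc : c ≠ '"' := fun hc => h (hc ▸ List.mem_cons_self ..)
    simp [pvGood, hc]
    exact ih (fun hm => h (List.mem_cons_of_mem _ hm))

lemma pvGood_true_append (pre tl : List Char) (hp : '"' ∉ pre) :
    pvGood true (pre ++ '"' :: tl) = pvGood false tl := by
  induction pre with
  | nil => simp [pvGood]
  | cons c r ih =>
    have hc : c ≠ '"' := fun hc => hp (hc ▸ List.mem_cons_self ..)
    simp [pvGood, hc]
    exact ih (fun hm => hp (List.mem_cons_of_mem _ hm))

lemma pvGood_false_cons (c : Char) (r : List Char) (hc : c ≠ '"')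
    (h : pvGood false (c :: r) = true) : pvGood false r = true := by
  simp [pvGood, hc] at h; exact h.2

lemma pvGood_false_dropWord : ∀ l : List Char, pvGood false l = true →
    pvGood false (l.drop (l.takeWhile pvWordChar).length) = true := by
  intro l
  induction l with
  | nil => intro; simpa
  | cons c r ih =>
    intro h
    by_cases hw : pvWordChar c
    · have hc : c ≠ '"' := by rintro rfl; exact absurd hw (by decide)
      simp only [List.takeWhile_cons, hw, if_true, List.length_cons, List.drop_succ_cons]
      exact ih (pvGood_false_cons c r hc h)
    · simp [List.takeWhile_cons, hw]
      exact h

lemma pv_quote_mem (rest : List Char) (h : pvGood true rest = true) : '"' ∈ rest := by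
  by_contra hq
  rw [pvGood_true_of_no_quote rest hq] at h
  exact absurd h (by simp)

-- dropping past the takeWhile prefix is dropWhile
lemma pv_drop_takeWhile_len (p : Char → Bool) : ∀ l : List Char,
    l.drop (l.takeWhile p).length = l.dropWhile p := by
  intro l
  induction l with
  | nil => rfl
  | cons c r ih =>
    by_cases hp : p c <;> simp [List.takeWhile_cons, List.dropWhile_cons, hp, ih]

-- decomposition of a list at its first quote
lemma pv_split (rest : List Char) (h : '"' ∈ rest) :
    rest = rest.takeWhile (· ≠ '"') ++ '"' :: rest.drop ((rest.takeWhile (· ≠ '"')).length + 1)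
      ∧ (rest.takeWhile (· ≠ '"')).length < rest.length := by
  have h1 : rest.takeWhile (· ≠ '"') ++ rest.dropWhile (· ≠ '"') = rest :=
    List.takeWhile_append_dropWhile
  rcases hdw : rest.dropWhile (· ≠ '"') with _ | ⟨d, dw⟩
  · exfalso
    rw [hdw, List.append_nil] at h1
    rw [← h1] at h
    have := List.mem_takeWhile_imp h
    simp at this
  · have hne' : rest.dropWhile (· ≠ '"') ≠ [] := by rw [hdw]; simp
    have h2 := List.head_dropWhile_not (fun x => decide (x ≠ '"')) (l := rest) hne'
    simp only [hdw, List.head_cons] at h2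
    have hd : d = '"' := by simpa using h2
    have hdrop : rest.drop ((rest.takeWhile (· ≠ '"')).length + 1) = dw := by
      rw [← List.tail_drop, pv_drop_takeWhile_len, hdw]
      rfl
    have hlen2 := congrArg List.length h1
    rw [hdw] at hlen2
    simp only [List.length_append, List.length_cons] at hlen2
    constructor
    · rw [hdrop]
      conv_lhs => rw [← h1, hdw, hd]
    · omega

-- quote parity (B's unmatched-quote check never fires on Pre_)
lemma pv_count_quotes : ∀ (l : List Char) (st : Bool), pvGood st l = true →
    l.count '"' % 2 = (if st then 1 else 0) := by
  intro l
  induction l with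
  | nil => intro st h; cases st <;> simp_all [pvGood]
  | cons c r ih =>
    intro st h
    by_cases hc : c = '"'
    · subst hc
      cases st
      · have h' : pvGood true r = true := by simpa [pvGood] using h
        have h2 := ih true h'
        rw [List.count_cons_self]
        simp at h2 ⊢
        omega
      · have h' : pvGood false r = true := by simpa [pvGood] using h
        have h2 := ih false h'
        rw [List.count_cons_self]
        simp at h2 ⊢
        omega
    · have hcnt : (c :: r).count '"' = r.count '"' := by
        simp [List.count_cons, eq_comm, hc]
      cases st
      · have h' : pvGood false r = true := by
          simp only [pvGood, if_neg hc, Bool.and_eq_true] at h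
          exact h.2
        rw [hcnt]
        exact ih false h'
      · have h' : pvGood true r = true := by
          simpa [pvGood, hc] using h
        rw [hcnt]
        exact ih true h'

-- the tokenizers agree on every good suffix
lemma pv_tok_eq (cs : List Char) :
    ∀ fuel i, pvGood false (cs.drop i) = true → cs.length - i < fuel →
      pvTokA cs fuel i = some (pvTokB (cs.drop i)) := by
  intro fuel
  induction fuel with
  | zero => intro i _ hf; omega
  | succ fuel IH =>
    intro i hg hf
    rcases h : cs.drop i with _ | ⟨c, rest⟩
    · have hlen0 : cs.length - i = 0 := by
        have := congrArg List.length h; simpa using this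
      simp [pvTokA, List.getElem?_eq_none (show cs.length ≤ i by omega), pvTokB]
    · have hi : i < cs.length := by
        by_contra hle
        rw [List.drop_eq_nil_of_le (by omega)] at h
        exact absurd h (by simp)
      have hc : cs[i]? = some c := by rw [← List.head?_drop, h]; rfl
      have hdrop1 : cs.drop (i+1) = rest := by rw [← List.tail_drop, h]; rfl
      have hlen : cs.length - i = rest.length + 1 := by
        have := congrArg List.length h
        simp [List.length_drop] at this
        omega
      have hgood : pvGood false (c :: rest) = true := h ▸ hg
      by_cases hq : c = '"'
      · -- quoted string
        subst hq
        have hg2 : pvGood true rest = true := by simpa [pvGood] using hgood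
        obtain ⟨hsplit, hlt⟩ := pv_split rest (pv_quote_mem rest hg2)
        set pre := rest.takeWhile (· ≠ '"') with hpre
        set tl := rest.drop (pre.length + 1) with htl
        have hnp : '"' ∉ pre := by
          intro hm
          have := List.mem_takeWhile_imp hm
          simp at this
        have hfind : PySem.Chars.find (cs.drop (i+1)) ['"'] = (pre.length : Int) := by
          rw [hdrop1]
          conv_lhs => rw [hsplit]
          exact pv_find_quote pre tl hnp
        have hcast : ((i : Int) + 1) = ((i + 1 : Nat) : Int) := by push_cast; ring
        have hff : PySem.Chars.findFrom cs ['"'] ((i : Int) + 1)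
            = ((i + 1 + pre.length : Nat) : Int) := by
          rw [hcast, PySem.Chars.findFrom_natCast cs ['"'] (i+1) (by omega), hfind]
          rw [if_neg (show ¬((pre.length : Int) = -1) by omega)]
          push_cast
          ring
        have hgt : pvGood false (cs.drop (i + 1 + pre.length + 1)) = true := by
          have : cs.drop (i + 1 + pre.length + 1) = tl := by
            rw [htl, ← hdrop1, List.drop_drop]
            ring_nf
          rw [this]
          rw [hsplit, pvGood_true_append pre tl hnp] at hg2
          exact hg2
        have hrec := IH (i + 1 + pre.length + 1) hgt (by omega)
        have htok : PySem.List.slice cs (some (i : Int))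
            (some (((i + 1 + pre.length : Nat) : Int) + 1)) = '"' :: pre ++ ['"'] := by
          have : (((i + 1 + pre.length : Nat) : Int) + 1) = (i : Int) + ((pre.length + 2 : Nat) : Int) := by
            push_cast; ring
          rw [this, PySem.List.slice_natCast_add, h,
            show pre.length + 2 = (pre.length + 1) + 1 from rfl, List.take_succ_cons]
          have h5 : rest.take (pre.length + 1) = pre ++ ['"'] := by
            conv_lhs => rw [hsplit]
            simp [List.take_append]
          simp [h5]
        simp only [pvTokA, hc]
        rw [if_pos trivial]
        simp only [hff]
        have hne : ((i + 1 + pre.length : Nat) : Int) ≠ -1 := by omega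
        rw [if_neg hne]
        have htoNat : ((i + 1 + pre.length : Nat) : Int).toNat = i + 1 + pre.length := by omega
        rw [htoNat, hrec]
        simp only [Option.map_some]
        rw [htok]
        conv_rhs => rw [pvTokB]
        rw [if_pos rfl, if_pos hlt]
        have harg : cs.drop (i + 1 + pre.length + 1) = rest.drop (pre.length + 1) := by
          rw [← hdrop1, List.drop_drop]; ring_nf
        rw [harg]
      · -- not a quote
        have hrest : pvGood false rest = true := pvGood_false_cons c rest hq hgood
        have hall : pvAllowed c = true := by
          simp [pvGood, hq] at hgood; exact hgood.1
        have IH1 := IH (i+1) (hdrop1 ▸ hrest) (by omega)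
        rw [hdrop1] at IH1
        by_cases hpar : c = '(' ∨ c = ')'
        · simp only [pvTokA, hc]
          rw [if_neg hq, if_pos (by rcases hpar with h|h <;> simp [h])]
          rw [IH1]
          conv_rhs => rw [pvTokB]
          rcases hpar with h|h <;> subst h <;> simp
        · by_cases hsp : PySem.Chars.isspace c = true
          · -- whitespace: A skips it, B's scanner matches nothing at it
            simp only [pvTokA, hc]
            rw [if_neg hq, if_neg (by simp only [Bool.or_eq_true, decide_eq_true_eq]; tauto), if_pos hsp, IH1]
            conv_rhs => rw [pvTokB]
            rw [if_neg hq]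
            have h2 : ¬ (((c = '>' || c = '<' || c = '!') && rest.head? = some '=') = true) := by
              intro hx
              simp only [Bool.and_eq_true, Bool.or_eq_true, decide_eq_true_eq] at hx
              obtain ⟨hcx, -⟩ := hx
              rcases hcx with (h|h)|h <;> subst h <;> exact absurd hsp (by decide)
            rw [if_neg h2]
            have h3 : ¬ ([['>'], ['<'], ['='], ['!'], [':'], ['('], [')'], ['-']].contains [c] = true) := by
              intro hx
              simp at hx
              rcases hx with rfl|rfl|rfl|rfl|rfl|rfl|rfl|rfl <;> exact absurd hsp (by decide)
            rw [if_neg h3, if_neg (by simp [pv_space_not_word c hsp])]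
          · by_cases hop : c = '>' ∨ c = '<' ∨ c = '=' ∨ c = '!'
            · -- operator characters
              have hslice2 : PySem.List.slice cs (some (i : Int)) (some ((i : Int) + 2))
                  = (c :: rest).take 2 := by
                have : ((i : Int) + 2) = (i : Int) + ((2 : Nat) : Int) := by push_cast; ring
                rw [this, PySem.List.slice_natCast_add, h]
              simp only [pvTokA, hc]
              rw [if_neg hq, if_neg (by simp only [Bool.or_eq_true, decide_eq_true_eq]; tauto), if_neg hsp,
                if_pos (by rcases hop with h|h|h|h <;> simp [h])]
              rcases hrest0 : rest with _ | ⟨d, rest2⟩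
              · -- last character
                subst hrest0
                rw [if_neg (by rintro ⟨h1, -⟩; simp at hlen; omega)]
                rw [IH1]
                conv_rhs => rw [pvTokB]
                rw [if_neg hq]
                have h3 : [['>'], ['<'], ['='], ['!'], [':'], ['('], [')'], ['-']].contains [c] = true := by
                  rcases hop with h|h|h|h <;> simp [h]
                rw [if_neg (by simp), if_pos h3]
                rfl
              · subst hrest0
                by_cases h2c : (c = '>' ∨ c = '<' ∨ c = '!') ∧ d = '='
                · -- two-character operator
                  obtain ⟨hc3, hd⟩ := h2c
                  have hmem2 : [['>','='], ['<','='], ['!','=']].contains ((c :: d :: rest2).take 2) = true := by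
                    rw [hd]
                    rcases hc3 with h|h|h <;> simp [h]
                  rw [if_pos ⟨by simp at hlen; omega, by rw [hslice2]; exact hmem2⟩]
                  have hdrop2 : cs.drop (i+2) = rest2 := by
                    rw [show i+2 = (i+1)+1 by rfl, ← List.tail_drop, hdrop1]; rfl
                  have hg3 : pvGood false (cs.drop (i+2)) = true := by
                    rw [hdrop2]
                    exact pvGood_false_cons d rest2 (by rw [hd]; decide) hrest
                  have hrec := IH (i+2) hg3 (by omega)
                  rw [hdrop2] at hrec
                  rw [hrec]
                  conv_rhs => rw [pvTokB]
                  rw [if_neg hq]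
                  have hguard : ((c = '>' || c = '<' || c = '!') && (d :: rest2).head? = some '=') = true := by
                    rw [hd]
                    rcases hc3 with h|h|h <;> simp [h]
                  rw [if_pos hguard]
                  rw [hslice2, hd]
                  simp
                · -- single-character operator
                  have hmem2 : ¬ ([['>','='], ['<','='], ['!','=']].contains ((c :: d :: rest2).take 2) = true) := by
                    intro hx
                    simp at hx
                    rcases hx with ⟨rfl, rfl⟩|⟨rfl, rfl⟩|⟨rfl, rfl⟩ <;>
                      exact h2c ⟨by tauto, rfl⟩
                  rw [if_neg (by rintro ⟨-, hmm⟩; rw [hslice2] at hmm; exact hmem2 hmm)]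
                  rw [IH1]
                  conv_rhs => rw [pvTokB]
                  rw [if_neg hq]
                  have hguard : ¬ (((c = '>' || c = '<' || c = '!') && (d :: rest2).head? = some '=') = true) := by
                    intro hx
                    simp only [Bool.and_eq_true, Bool.or_eq_true, decide_eq_true_eq] at hx
                    obtain ⟨hcs, hds⟩ := hx
                    simp at hds
                    exact h2c ⟨by tauto, hds⟩
                  rw [if_neg hguard]
                  have h3 : [['>'], ['<'], ['='], ['!'], [':'], ['('], [')'], ['-']].contains [c] = true := by
                    rcases hop with h|h|h|h <;> simp [h]
                  rw [if_pos h3]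
                  rfl
            · by_cases hmc : c = '-' ∨ c = ':'
              · simp only [pvTokA, hc]
                rw [if_neg hq, if_neg (by simp only [Bool.or_eq_true, decide_eq_true_eq]; tauto), if_neg hsp,
                  if_neg (by simp only [Bool.or_eq_true, decide_eq_true_eq]; tauto)]
                conv_rhs => rw [pvTokB]
                rcases hmc with h|h <;> subst h <;> simp [IH1]
              · -- word
                have hw : pvWordChar c = true := by
                  simp only [pvAllowed, Bool.or_eq_true, List.contains_eq_mem,
                    List.mem_cons, decide_eq_true_eq] at hall
                  rcases hall with (h|h)|h
                  · exact h
                  · exact absurd h hsp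
                  · simp at h; tauto
                have hwtake : (c :: rest).takeWhile pvWordChar
                    = c :: rest.takeWhile pvWordChar := by simp [List.takeWhile_cons, hw]
                have hwe : pvWordEnd cs i = i + ((rest.takeWhile pvWordChar).length + 1) := by
                  rw [pvWordEnd, h, hwtake]
                  simp
                have hslicew : PySem.List.slice cs (some (i : Int))
                    (some ((pvWordEnd cs i : Nat) : Int)) = c :: rest.takeWhile pvWordChar := by
                  rw [hwe]
                  have : (((i + ((rest.takeWhile pvWordChar).length + 1) : Nat) : Int))
                      = (i : Int) + (((rest.takeWhile pvWordChar).length + 1 : Nat) : Int) := by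
                    push_cast; ring
                  rw [this, PySem.List.slice_natCast_add, h]
                  have := (List.prefix_iff_eq_take.mp (List.takeWhile_prefix pvWordChar
                    (l := c :: rest))).symm
                  rw [hwtake] at this
                  simpa using this
                have hdropw : cs.drop (pvWordEnd cs i)
                    = rest.drop (rest.takeWhile pvWordChar).length := by
                  rw [hwe, show i + ((rest.takeWhile pvWordChar).length + 1)
                    = (i+1) + (rest.takeWhile pvWordChar).length by omega,
                    ← List.drop_drop, hdrop1]
                have hgw : pvGood false (cs.drop (pvWordEnd cs i)) = true := by
                  have := pvGood_false_dropWord (c :: rest) hgood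
                  rw [hwtake] at this
                  simp only [List.length_cons, List.drop_succ_cons] at this
                  rw [hdropw]
                  exact this
                have hrec := IH (pvWordEnd cs i) hgw (by rw [hwe]; omega)
                simp only [pvTokA, hc]
                rw [if_neg hq, if_neg (by simp only [Bool.or_eq_true, decide_eq_true_eq]; tauto), if_neg hsp,
                  if_neg (by simp only [Bool.or_eq_true, decide_eq_true_eq]; tauto),
                  if_neg (by intro hcm; exact hmc (Or.inl hcm)),
                  if_neg (by intro hcm; exact hmc (Or.inr hcm))]
                rw [hrec, hdropw, hslicew]
                conv_rhs => rw [pvTokB]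
                rw [if_neg hq]
                have hg2' : ¬ (((c = '>' || c = '<' || c = '!') && rest.head? = some '=') = true) := by
                  intro hx
                  simp only [Bool.and_eq_true, Bool.or_eq_true, decide_eq_true_eq] at hx
                  obtain ⟨hcx, -⟩ := hx
                  rcases hcx with (h'|h')|h' <;> subst h' <;> exact absurd hw (by decide)
                rw [if_neg hg2']
                have hg3' : ¬ ([['>'], ['<'], ['='], ['!'], [':'], ['('], [')'], ['-']].contains [c] = true) := by
                  intro hx
                  simp at hx
                  rcases hx with rfl|rfl|rfl|rfl|rfl|rfl|rfl|rfl <;> exact absurd hw (by decide)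
                rw [if_neg hg3', if_pos hw]
                rfl

-- ===== VERDICT (by name: the statement is the Claim_ definition above) =====
theorem preprocess_implicit_and_spec : Claim_equal_preprocess_implicit_and := by
  intro query _hdom hpre
  unfold Spec_preprocess_implicit_and preprocess_implicit_and preprocess_implicit_and_alt
  have hpre' : pvGood false query.toList = true := hpre
  have htok := pv_tok_eq query.toList (query.toList.length + 1) 0
    (by simpa using hpre') (by omega)
  rw [List.drop_zero] at htok
  rw [htok]
  have hcount : ¬ (query.toList.count '"' % 2 = 1) := by
    have h2 := pv_count_quotes query.toList false hpre'
    simp at h2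
    omega
  rw [if_neg hcount]
  show String.ofList (PySem.Chars.join [' '] (pvAndA (pvTokB query.toList))) = _
  rw [pv_and_eq]
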